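-- pv_equiv track=rewrite | github.com/akash-spectrasoln/migcockpit-resrructured | services/migration_service/utils/business_name_remap.py | extract_row_values_by_metadata
-- ===== SOURCE A (Python) =====
-- from typing import Any, Optional
--
-- def _resolve_final_business_name(
--     column_metadata: list[dict[str, Any]],
-- ) -> tuple[dict[str, str], list[str]]:
--     """
--     Build source_key -> target_key mapping and ordered target column list.
--     Handles duplicate business names by appending _1, _2 deterministically.
--
--     Returns:
--         (source_to_target: dict[str, str], ordered_targets: list[str])
--     """
--     source_to_target: dict[str, str] = {}
--     business_name_count: dict[str, int] = {}
--     ordered_targets: list[str] = []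
--
--     for col in column_metadata:
--         business = col.get("business_name") or col.get("name") or ""
--         if not business:
--             business = col.get("technical_name") or col.get("db_name") or ""
--         if not business:
--             continue
--
--         if business in business_name_count:
--             business_name_count[business] += 1
--             final_target = f"{business}_{business_name_count[business]}"
--         else:
--             business_name_count[business] = 1
--             final_target = business
--
--         ordered_targets.append(final_target)
--
--         tech = col.get("technical_name")
--         db = col.get("db_name")
--         if tech:
--             source_to_target[tech] = final_target
--         if db and db not in source_to_target:
--             source_to_target[db] = final_target
--         if col.get("name") and col.get("name") not in source_to_target:
--             source_to_target[col["name"]] = final_target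
--         if col.get("business_name") and col.get("business_name") not in source_to_target:
--             source_to_target[col["business_name"]] = final_target
--
--         if tech:
--             if tech.endswith("_l"):
--                 base = tech[:-2]
--                 for alt in (f"__L__.{base}", f"_L_{base}"):
--                     if alt not in source_to_target:
--                         source_to_target[alt] = final_target
--             elif tech.endswith("_r"):
--                 base = tech[:-2]
--                 for alt in (f"__R__.{base}", f"_R_{base}"):
--                     if alt not in source_to_target:
--                         source_to_target[alt] = final_target
--             else:
--                 for alt in (f"__L__.{tech}", f"__R__.{tech}", f"_L_{tech}", f"_R_{tech}"):
--                     if alt not in source_to_target: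
--                         source_to_target[alt] = final_target
--
--     return source_to_target, ordered_targets
--
-- def extract_row_values_by_metadata(
--     row: dict[str, Any],
--     column_metadata: list[dict[str, Any]],
-- ) -> list[Any]:
--     """Extract values from a row in metadata column order; None for missing keys."""
--     if not column_metadata:
--         return []
--     source_to_target, ordered_targets = _resolve_final_business_name(column_metadata)
--     target_to_sources: dict[str, list[str]] = {}
--     for src, tgt in source_to_target.items():
--         if tgt not in target_to_sources:
--             target_to_sources[tgt] = []
--         target_to_sources[tgt].append(src)
--
--     values: list[Any] = []
--     for target in ordered_targets:
--         val = row.get(target)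
--         if val is not None:
--             values.append(val)
--             continue
--         for src in target_to_sources.get(target, []):
--             if src in row:
--                 values.append(row[src])
--                 break
--         else:
--             values.append(None)
--     return values
-- ===== SOURCE B (Python) =====
-- def _business(col):
--     for key in ("business_name", "name", "technical_name", "db_name"):
--         v = col.get(key)
--         if v:
--             return v
--     return None
--
--
-- def _column_sources(col):
--     """Candidate source keys for this column, in claim order; True = always overwrite."""
--     tech = col.get("technical_name")
--     out = []
--     if tech:
--         out.append((tech, True))
--     for key in ("db_name", "name", "business_name"):
--         v = col.get(key)
--         if v:
--             out.append((v, False))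
--     if tech:
--         if tech.endswith("_l"):
--             base = tech[:-2]
--             alts = ("__L__." + base, "_L_" + base)
--         elif tech.endswith("_r"):
--             base = tech[:-2]
--             alts = ("__R__." + base, "_R_" + base)
--         else:
--             alts = ("__L__." + tech, "__R__." + tech, "_L_" + tech, "_R_" + tech)
--         for a in alts:
--             out.append((a, False))
--     return out
--
--
-- def extract_row_values_by_metadata(row, column_metadata):
--     source_to_target = {}
--     counts = {}
--     targets = []
--     for col in column_metadata:
--         b = _business(col)
--         if b is None:
--             continue
--         k = counts.get(b, 0)
--         counts[b] = k + 1
--         target = b if k == 0 else f"{b}_{k + 1}"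
--         targets.append(target)
--         for src, forced in _column_sources(col):
--             if forced or src not in source_to_target:
--                 source_to_target[src] = target
--     values = []
--     for t in targets:
--         v = row.get(t)
--         if v is None:
--             v = next((row[s] for s, tg in source_to_target.items()
--                       if tg == t and s in row), None)
--         values.append(v)
--     return values
-- ===== Notes on version B (the rewrite author's own statement) =====
-- stated objective: simpler
-- what changed: B replaces A's branchy source_to_target builder plus a separate dict-inversion pass (target -> source list) with a per-column candidate-source list consumed by one guarded fold, and extraction scans the forward map directly with a first-match search instead of building the inverted dict; duplicate-target numbering uses a get-with-default counter formula instead of A's membership branch.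
import Mathlib
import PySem

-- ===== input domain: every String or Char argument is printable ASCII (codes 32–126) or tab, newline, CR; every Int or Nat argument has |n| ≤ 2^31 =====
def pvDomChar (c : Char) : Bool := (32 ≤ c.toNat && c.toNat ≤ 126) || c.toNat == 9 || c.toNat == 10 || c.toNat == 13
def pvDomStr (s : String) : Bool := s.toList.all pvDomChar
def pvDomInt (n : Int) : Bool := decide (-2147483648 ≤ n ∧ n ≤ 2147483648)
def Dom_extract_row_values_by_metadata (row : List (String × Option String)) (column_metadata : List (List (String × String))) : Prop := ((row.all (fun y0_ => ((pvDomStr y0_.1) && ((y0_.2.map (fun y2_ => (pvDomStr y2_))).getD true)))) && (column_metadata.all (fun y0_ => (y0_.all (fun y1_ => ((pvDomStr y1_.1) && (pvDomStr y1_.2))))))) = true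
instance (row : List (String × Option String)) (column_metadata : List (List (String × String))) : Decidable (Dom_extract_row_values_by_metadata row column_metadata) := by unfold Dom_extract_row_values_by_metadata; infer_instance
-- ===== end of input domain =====

-- B fuses alias resolution into one candidate-list pass and drops the target→sources
-- inversion dict, scanning the forward map directly during extraction (objective: simpler).

-- ===== PORT A =====
-- col.get(k) on the column dict (association list, first match)
def pvAget (col : List (String × String)) (k : String) : Option String :=
  (PySem.Dict.mk col).get? k

-- Python truthiness of an Optional[str]: non-None and non-empty
def pvTruthy : Option String → Bool
  | some s => s ≠ ""
  | none => false

-- Python 'a or b' on Optional[str]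
def pvOrS (a b : Option String) : Option String := if pvTruthy a then a else b

-- the alias tuple A builds from a technical name (the three endswith branches)
def pvA_alts (t : String) : List String :=
  if PySem.Str.endswith t "_l" then
    let base := PySem.Str.slice t none (some (-2))
    ["__L__." ++ base, "_L_" ++ base]
  else if PySem.Str.endswith t "_r" then
    let base := PySem.Str.slice t none (some (-2))
    ["__R__." ++ base, "_R_" ++ base]
  else ["__L__." ++ t, "__R__." ++ t, "_L_" ++ t, "_R_" ++ t]

-- loop state of _resolve_final_business_name: (source_to_target, business_name_count, ordered_targets)
def pvA_step (st : PySem.Dict String String × PySem.Dict String Int × List String)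
    (col : List (String × String)) :
    PySem.Dict String String × PySem.Dict String Int × List String :=
  let business := (pvOrS (pvAget col "business_name") (pvAget col "name")).getD ""
  let business := if business = "" then (pvOrS (pvAget col "technical_name") (pvAget col "db_name")).getD "" else business
  if business = "" then st
  else
    let cf :=
      match st.2.1.get? business with
      | some n => (st.2.1.insert business (n + 1), business ++ "_" ++ PySem.Int.toStr (n + 1))
      | none => (st.2.1.insert business 1, business)
    let cnt := cf.1
    let final := cf.2
    let targets := st.2.2 ++ [final]
    let tech := pvAget col "technical_name"
    let db := pvAget col "db_name"
    let s := st.1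
    let s := if pvTruthy tech then s.insert (tech.getD "") final else s
    let s := if pvTruthy db && !(s.contains (db.getD "")) then s.insert (db.getD "") final else s
    let s := if pvTruthy (pvAget col "name") && !(s.contains ((pvAget col "name").getD "")) then
        s.insert ((pvAget col "name").getD "") final else s
    let s := if pvTruthy (pvAget col "business_name") && !(s.contains ((pvAget col "business_name").getD "")) then
        s.insert ((pvAget col "business_name").getD "") final else s
    let s := if pvTruthy tech then
        (pvA_alts (tech.getD "")).foldl (fun s a => if !(s.contains a) then s.insert a final else s) s
      else s
    (s, cnt, targets)

def extract_row_values_by_metadata (row : List (String × Option String)) (column_metadata : List (List (String × String))) : List (Option String) :=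
  if column_metadata.isEmpty then []
  else
    let st := column_metadata.foldl pvA_step (PySem.Dict.empty, PySem.Dict.empty, [])
    let t2s := st.1.items.foldl
      (fun (d : PySem.Dict String (List String)) p =>
        let d := if d.contains p.2 then d else d.insert p.2 ([] : List String)
        d.modify p.2 [] (· ++ [p.1]))
      PySem.Dict.empty
    let rowD := PySem.Dict.mk row
    st.2.2.map (fun target =>
      match (rowD.get? target).join with
      | some v => some v
      | none =>
        match (t2s.getD target []).find? (fun src => rowD.contains src) with
        | some src => (rowD.get? src).join
        | none => none)

-- ===== PORT B =====
def pvBget (col : List (String × String)) (k : String) : Option String :=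
  (PySem.Dict.mk col).get? k

def pvBtruthy : Option String → Bool
  | some s => s ≠ ""
  | none => false

-- _business: first truthy value among the four metadata keys
def pvB_firstTruthy (col : List (String × String)) : List String → Option String
  | [] => none
  | k :: ks =>
    match pvBget col k with
    | some v => if v ≠ "" then some v else pvB_firstTruthy col ks
    | none => pvB_firstTruthy col ks

def pvB_business (col : List (String × String)) : Option String :=
  pvB_firstTruthy col ["business_name", "name", "technical_name", "db_name"]

-- alias variants of a technical name
def pvB_alts (t : String) : List String :=
  if PySem.Str.endswith t "_l" then
    let base := PySem.Str.slice t none (some (-2))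
    ["__L__." ++ base, "_L_" ++ base]
  else if PySem.Str.endswith t "_r" then
    let base := PySem.Str.slice t none (some (-2))
    ["__R__." ++ base, "_R_" ++ base]
  else ["__L__." ++ t, "__R__." ++ t, "_L_" ++ t, "_R_" ++ t]

-- _column_sources: candidate source keys in claim order; true = forced overwrite
def pvB_sources (col : List (String × String)) : List (String × Bool) :=
  let tech := pvBget col "technical_name"
  let out : List (String × Bool) := if pvBtruthy tech then [(tech.getD "", true)] else []
  let out := ["db_name", "name", "business_name"].foldl
    (fun acc k =>
      match pvBget col k with
      | some v => if v ≠ "" then acc ++ [(v, false)] else acc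
      | none => acc)
    out
  if pvBtruthy tech then out ++ (pvB_alts (tech.getD "")).map (fun a => (a, false))
  else out

def pvB_step (st : PySem.Dict String String × PySem.Dict String Int × List String)
    (col : List (String × String)) :
    PySem.Dict String String × PySem.Dict String Int × List String :=
  match pvB_business col with
  | none => st
  | some b =>
    let k := st.2.1.getD b 0
    let cnt := st.2.1.insert b (k + 1)
    let target := if k = 0 then b else b ++ "_" ++ PySem.Int.toStr (k + 1)
    let s2t := (pvB_sources col).foldl
      (fun s p => if p.2 || !(s.contains p.1) then s.insert p.1 target else s) st.1
    (s2t, cnt, st.2.2 ++ [target])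

def extract_row_values_by_metadata_alt (row : List (String × Option String)) (column_metadata : List (List (String × String))) : List (Option String) :=
  let st := column_metadata.foldl pvB_step (PySem.Dict.empty, PySem.Dict.empty, [])
  let rowD := PySem.Dict.mk row
  st.2.2.map (fun t =>
    match (rowD.get? t).join with
    | some v => some v
    | none =>
      match st.1.items.find? (fun p => p.2 == t && rowD.contains p.1) with
      | some p => (rowD.get? p.1).join
      | none => none)

-- ===== PRECONDITION & SPEC =====
def Spec_extract_row_values_by_metadata (row : List (String × Option String)) (column_metadata : List (List (String × String))) (out : List (Option String)) : Prop := out = extract_row_values_by_metadata_alt row column_metadata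
instance (row : List (String × Option String)) (column_metadata : List (List (String × String))) (out : List (Option String)) : Decidable (Spec_extract_row_values_by_metadata row column_metadata out) := by unfold Spec_extract_row_values_by_metadata; infer_instance

-- ===== CLAIM (what is proved, stated in full; the proofs are below) =====
def Claim_equal_extract_row_values_by_metadata : Prop := ∀ (row : List (String × Option String)) (column_metadata : List (List (String × String))), Dom_extract_row_values_by_metadata row column_metadata → Spec_extract_row_values_by_metadata row column_metadata (extract_row_values_by_metadata row column_metadata)

-- ===== LEMMAS AND PROOFS =====

-- invariant of business_name_count: unique keys, every stored count ≥ 1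
def pvCntInv (c : PySem.Dict String Int) : Prop :=
  c.keys.Nodup ∧ ∀ p ∈ c.items, 1 ≤ p.2

theorem pvCntInv_empty : pvCntInv PySem.Dict.empty := by
  constructor
  · exact PySem.Dict.nodup_keys_empty
  · intro p hp; simp [PySem.Dict.empty] at hp

theorem pvB_business_eq (col : List (String × String)) :
    pvB_business col =
      (if (if ((pvOrS (pvAget col "business_name") (pvAget col "name")).getD "") = ""
           then (pvOrS (pvAget col "technical_name") (pvAget col "db_name")).getD ""
           else (pvOrS (pvAget col "business_name") (pvAget col "name")).getD "") = ""
       then none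
       else some (if ((pvOrS (pvAget col "business_name") (pvAget col "name")).getD "") = ""
           then (pvOrS (pvAget col "technical_name") (pvAget col "db_name")).getD ""
           else (pvOrS (pvAget col "business_name") (pvAget col "name")).getD "")) := by
  simp only [pvB_business, pvB_firstTruthy, pvBget, pvAget, pvOrS]
  cases h1 : (PySem.Dict.mk col).get? "business_name" <;>
  cases h2 : (PySem.Dict.mk col).get? "name" <;>
  cases h3 : (PySem.Dict.mk col).get? "technical_name" <;>
  cases h4 : (PySem.Dict.mk col).get? "db_name" <;>
    simp [pvTruthy] <;> split_ifs <;> simp_all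

theorem pvCnt_step (c : PySem.Dict String Int) (b : String) (h : pvCntInv c) :
    (match c.get? b with
      | some n => (c.insert b (n + 1), b ++ "_" ++ PySem.Int.toStr (n + 1))
      | none => (c.insert b 1, b))
    = (c.insert b (c.getD b 0 + 1),
       if c.getD b 0 = 0 then b else b ++ "_" ++ PySem.Int.toStr (c.getD b 0 + 1)) := by
  cases hg : c.get? b with
  | none => simp [PySem.Dict.getD_eq_get?_getD, hg]
  | some n =>
    have hmem := PySem.Dict.mem_items_of_get?_eq_some _ hg
    have h1 : 1 ≤ n := h.2 _ hmem
    have hne : n ≠ 0 := by omega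
    simp [PySem.Dict.getD_eq_get?_getD, hg, hne]

theorem pvCntInv_insert (c : PySem.Dict String Int) (b : String) (h : pvCntInv c) :
    pvCntInv (c.insert b (c.getD b 0 + 1)) := by
  have hk : 0 ≤ c.getD b 0 := by
    cases hg : c.get? b with
    | none => simp [PySem.Dict.getD_eq_get?_getD, hg]
    | some n =>
      have h1 := h.2 _ (PySem.Dict.mem_items_of_get?_eq_some _ hg)
      simp [PySem.Dict.getD_eq_get?_getD, hg]; omega
  constructor
  · exact PySem.Dict.nodup_keys_insert _ _ _ h.1
  · intro p hp
    rcases (PySem.Dict.mem_items_insert _ _ _ _).1 hp with h' | h'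
    · subst h'; simp; omega
    · exact h.2 _ h'.1

-- the middle segment of B's candidate list, one key
def pvMc (col : List (String × String)) (k : String) : List (String × Bool) :=
  match pvBget col k with
  | some v => if v ≠ "" then [(v, false)] else []
  | none => []

theorem pvB_sources_decomp (col : List (String × String)) :
    pvB_sources col =
      (if pvBtruthy (pvBget col "technical_name") then [((pvBget col "technical_name").getD "", true)] else [])
      ++ pvMc col "db_name" ++ pvMc col "name" ++ pvMc col "business_name"
      ++ (if pvBtruthy (pvBget col "technical_name") then
            (pvB_alts ((pvBget col "technical_name").getD "")).map (fun a => (a, false))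
          else []) := by
  have hstep : ∀ (acc : List (String × Bool)) (k : String),
      (match pvBget col k with
        | some v => if v ≠ "" then acc ++ [(v, false)] else acc
        | none => acc) = acc ++ pvMc col k := by
    intro acc k
    cases h : pvBget col k with
    | none => simp [pvMc, h]
    | some v => by_cases hv : v = "" <;> simp [pvMc, h, hv]
  simp only [pvB_sources, List.foldl, hstep]
  by_cases ht : pvBtruthy (pvBget col "technical_name") = true <;>
    simp [ht, List.append_assoc]

theorem pvFoldPairs (final : String) (alts : List String) (s : PySem.Dict String String) :
    (alts.map (fun a => (a, false))).foldl
      (fun s (p : String × Bool) => if p.2 || !(s.contains p.1) then s.insert p.1 final else s) s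
    = alts.foldl (fun s a => if !(s.contains a) then s.insert a final else s) s := by
  induction alts generalizing s with
  | nil => rfl
  | cons a l ih => simp only [List.map_cons, List.foldl_cons, Bool.false_or, ih]

theorem pvFoldMc (col : List (String × String)) (k final : String) (s : PySem.Dict String String) :
    (pvMc col k).foldl
      (fun s (p : String × Bool) => if p.2 || !(s.contains p.1) then s.insert p.1 final else s) s
    = if pvTruthy (pvAget col k) && !(s.contains ((pvAget col k).getD "")) then
        s.insert ((pvAget col k).getD "") final else s := by
  simp only [pvMc, pvBget, pvAget]
  cases h : (PySem.Dict.mk col).get? k with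
  | none => simp [pvTruthy]
  | some v =>
    by_cases hv : v = "" <;> by_cases hc : s.contains v = true <;>
      simp [pvTruthy, hv, hc, List.foldl]

theorem pvFoldTech (final : String) (g : Option String) (s : PySem.Dict String String) :
    ((if pvTruthy g then [(g.getD "", true)] else []) : List (String × Bool)).foldl
      (fun s (p : String × Bool) => if p.2 || !(s.contains p.1) then s.insert p.1 final else s) s
    = if pvTruthy g then s.insert (g.getD "") final else s := by
  cases g <;> by_cases h : pvTruthy (some ‹String›) = true <;>
    simp_all [pvTruthy, List.foldl]

theorem pvFoldAlts (final t : String) (g : Option String) (s : PySem.Dict String String) :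
    ((if pvTruthy g then (pvA_alts t).map (fun a => (a, false)) else []) : List (String × Bool)).foldl
      (fun s (p : String × Bool) => if p.2 || !(s.contains p.1) then s.insert p.1 final else s) s
    = if pvTruthy g then
        (pvA_alts t).foldl (fun s a => if !(s.contains a) then s.insert a final else s) s
      else s := by
  by_cases h : pvTruthy g = true
  · rw [if_pos h, if_pos h, pvFoldPairs]
  · rw [if_neg h, if_neg h]; rfl

theorem pvBtruthy_eq (g : Option String) : pvBtruthy g = pvTruthy g := by
  cases g <;> rfl

theorem pvAlts_eq (t : String) : pvB_alts t = pvA_alts t := rfl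

theorem pvBget_eq (col : List (String × String)) (k : String) : pvBget col k = pvAget col k := rfl

set_option maxHeartbeats 1000000 in
theorem pvStep_eq (st : PySem.Dict String String × PySem.Dict String Int × List String)
    (col : List (String × String)) (h : pvCntInv st.2.1) :
    pvA_step st col = pvB_step st col ∧ pvCntInv (pvB_step st col).2.1 := by
  simp only [pvA_step, pvB_step, pvB_business_eq]
  simp only [pvB_sources_decomp, pvBget_eq, pvBtruthy_eq, pvAlts_eq]
  simp only [List.foldl_append]
  simp only [pvFoldTech, pvFoldMc, pvFoldAlts]
  generalize ((pvOrS (pvAget col "technical_name") (pvAget col "db_name")).getD "") = b0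
  generalize hb1 : ((pvOrS (pvAget col "business_name") (pvAget col "name")).getD "") = b1
  generalize (if b1 = "" then b0 else b1) = b2
  by_cases hE : b2 = ""
  · simp only [hE, reduceIte]
    exact ⟨trivial, h⟩
  · simp only [if_neg hE]
    rw [pvCnt_step _ _ h]
    refine ⟨?_, pvCntInv_insert _ _ h⟩
    rfl

theorem pvFold_eq (cols : List (List (String × String)))
    (st : PySem.Dict String String × PySem.Dict String Int × List String)
    (h : pvCntInv st.2.1) :
    cols.foldl pvA_step st = cols.foldl pvB_step st := by
  induction cols generalizing st with
  | nil => rfl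
  | cons c cs ih =>
    obtain ⟨he, hinv⟩ := pvStep_eq st c h
    simp only [List.foldl_cons, he]
    exact ih _ hinv

-- the inversion loop of A, characterised: its per-target list is a filter of the forward map
theorem pvInv_getD (l : List (String × String)) (d : PySem.Dict String (List String)) (t : String) :
    (l.foldl (fun (d : PySem.Dict String (List String)) p =>
        let d := if d.contains p.2 then d else d.insert p.2 ([] : List String)
        d.modify p.2 [] (· ++ [p.1])) d).getD t []
    = d.getD t [] ++ (l.filter (fun p => p.2 == t)).map (·.1) := by
  induction l generalizing d with
  | nil => simp
  | cons p l ih =>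
    simp only [List.foldl_cons, ih]
    by_cases hpt : p.2 = t
    · subst hpt
      by_cases hc : d.contains p.2 = true <;>
        simp [hc, PySem.Dict.getD_modify_self, PySem.Dict.getD_insert_self,
          PySem.Dict.getD_of_not_contains]
    · have h1 : t ≠ p.2 := fun h => hpt h.symm
      by_cases hc : d.contains p.2 = true <;>
        simp [hc, PySem.Dict.getD_modify, PySem.Dict.getD_insert, h1, hpt]

theorem pvFind_filter_map (l : List (String × String)) (t : String) (q : String → Bool) :
    ((l.filter (fun p => p.2 == t)).map (·.1)).find? q
    = (l.find? (fun p => p.2 == t && q p.1)).map (·.1) := by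
  induction l with
  | nil => simp
  | cons p l ih =>
    by_cases h1 : p.2 = t
    · by_cases h2 : q p.1 = true <;> simp [h1, h2, List.find?, ih]
    · have hf : (p.2 == t) = false := by simp [h1]
      simp [hf, List.find?, ih]

-- ===== VERDICT (by name: the statement is the Claim_ definition above) =====
theorem extract_row_values_by_metadata_spec : Claim_equal_extract_row_values_by_metadata := by
  intro row cm _hdom
  unfold Spec_extract_row_values_by_metadata
  unfold extract_row_values_by_metadata extract_row_values_by_metadata_alt
  cases cm with
  | nil => rfl
  | cons c cs =>
    have hne : (c :: cs : List (List (String × String))).isEmpty ≠ true := by simp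
    rw [if_neg hne]
    rw [← pvFold_eq _ _ pvCntInv_empty]
    apply List.map_congr_left
    intro t _ht
    cases (PySem.Dict.mk row).get? t |>.join with
    | some v => rfl
    | none =>
      rw [pvInv_getD, PySem.Dict.getD_empty, List.nil_append, pvFind_filter_map]
      cases ((c :: cs).foldl pvA_step (PySem.Dict.empty, PySem.Dict.empty, [])).1.items.find?
          (fun p => p.2 == t && (PySem.Dict.mk row).contains p.1) with
      | none => rfl
      | some p => rfl
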